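-- pv_equiv track=rewrite | github.com/evroon/bracket | backend/bracket/logic/scheduling/double_elimination.py | generate_seeded_bracket
-- ===== SOURCE A (Python) =====
-- def generate_seeded_bracket(bracket_size: int) -> list[int]:
--     """Generate standard seeded bracket positions.
--
--     Returns list of seed numbers in bracket order.
--     For bracket_size=8: [1, 8, 4, 5, 2, 7, 3, 6]
--
--     Ensures top seeds are on opposite sides and face lowest seeds first.
--     """
--     if bracket_size == 1:
--         return [1]
--
--     bracket = [1, 2]
--     while len(bracket) < bracket_size:
--         total = len(bracket) * 2 + 1
--         new_bracket = []
--         for seed in bracket: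
--             new_bracket.append(seed)
--             new_bracket.append(total - seed)
--         bracket = new_bracket
--
--     return bracket
-- ===== SOURCE B (Python) =====
-- def generate_seeded_bracket(bracket_size: int) -> list[int]:
--     """Compute each seed directly from the bits of its position index."""
--     if bracket_size == 1:
--         return [1]
--
--     m = 2
--     k = 1
--     while m < bracket_size:
--         m *= 2
--         k += 1
--
--     result = []
--     for i in range(m):
--         v = 1 + ((i >> (k - 1)) & 1)
--         level = 2
--         for t in range(k - 2, -1, -1):
--             level *= 2
--             if (i >> t) & 1:
--                 v = level + 1 - v
--         result.append(v)
--     return result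
-- ===== Notes on version B (the rewrite author's own statement) =====
-- stated objective: alternative
-- what changed: Replaces A's level-by-level doubling construction (rebuilding the whole bracket at each level by interleaving seed and total-seed) with a single pass over the positions that computes each seed directly from the bits of its index.
import Mathlib
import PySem

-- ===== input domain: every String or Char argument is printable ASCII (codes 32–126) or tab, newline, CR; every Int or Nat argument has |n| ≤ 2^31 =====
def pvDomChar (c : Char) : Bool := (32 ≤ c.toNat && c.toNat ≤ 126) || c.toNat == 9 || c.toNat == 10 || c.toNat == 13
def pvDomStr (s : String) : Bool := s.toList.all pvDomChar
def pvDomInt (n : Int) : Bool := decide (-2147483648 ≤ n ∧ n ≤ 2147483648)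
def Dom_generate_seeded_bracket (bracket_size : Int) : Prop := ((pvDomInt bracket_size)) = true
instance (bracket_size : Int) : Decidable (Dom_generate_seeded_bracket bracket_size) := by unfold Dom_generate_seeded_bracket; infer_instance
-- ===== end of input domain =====

-- B replaces A's level-by-level doubling construction by a direct per-index computation of each
-- seed from the bits of its position (alternative algorithm, same asymptotic cost).

-- ===== PORT A =====
-- A's while-loop (fuel-bounded structural recursion; the length doubles from 2 each pass,
-- so 64 passes cover every Int admitted by Dom_)
def growA : Nat → Int → List Int → List Int
  | 0, _, bracket => bracket
  | fuel + 1, target, bracket =>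
    if (bracket.length : Int) < target then
      let total : Int := (bracket.length : Int) * 2 + 1
      growA fuel target (bracket.foldl (fun new_bracket seed => new_bracket ++ [seed, total - seed]) [])
    else bracket

def generate_seeded_bracket (bracket_size : Int) : List Int :=
  if bracket_size = 1 then [1] else growA 64 bracket_size [1, 2]

-- ===== PORT B =====
-- (i >> t) & 1; exact for the nonnegative i, t that B uses (i ∈ range(m), t ≥ 0)
def pyBit (i t : Int) : Int := ((i.toNat >>> t.toNat) % 2 : Nat)

-- B's size loop: while m < bracket_size: m *= 2; k += 1
def altSize : Nat → Int → Int → Int → Int × Int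
  | 0, _, m, k => (m, k)
  | fuel + 1, target, m, k => if m < target then altSize fuel target (m * 2) (k + 1) else (m, k)

-- B's inner loop: v = 1 + top bit; for t in range(k-2, -1, -1): level *= 2; flip if bit set
def seedAt (k i : Int) : Int :=
  ((PySem.List.pyRange (k - 2) (-1) (-1)).foldl
    (fun (vl : Int × Int) t =>
      let level := vl.2 * 2
      (if pyBit i t = 1 then level + 1 - vl.1 else vl.1, level))
    (1 + pyBit i (k - 1), 2)).1

def generate_seeded_bracket_alt (bracket_size : Int) : List Int :=
  if bracket_size = 1 then [1]
  else
    let mk := altSize 64 bracket_size 2 1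
    (PySem.List.pyRange 0 mk.1 1).map (fun i => seedAt mk.2 i)

-- ===== PRECONDITION & SPEC =====
def Spec_generate_seeded_bracket (bracket_size : Int) (out : List Int) : Prop := out = generate_seeded_bracket_alt bracket_size
instance (bracket_size : Int) (out : List Int) : Decidable (Spec_generate_seeded_bracket bracket_size out) := by unfold Spec_generate_seeded_bracket; infer_instance

-- ===== CLAIM (what is proved, stated in full; the proofs are below) =====
def Claim_equal_generate_seeded_bracket : Prop := ∀ (bracket_size : Int), Dom_generate_seeded_bracket bracket_size → Spec_generate_seeded_bracket bracket_size (generate_seeded_bracket bracket_size)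

-- ===== LEMMAS AND PROOFS =====

-- canonical description of A's doubling step and its iterate
def stepD (b : List Int) : List Int := b.flatMap (fun s => [s, ((b.length : Int) * 2 + 1) - s])

def iterD : Nat → List Int
  | 0 => [1, 2]
  | j + 1 => stepD (iterD j)

-- B's loop body and its Nat-indexed pair state (value, level)
def stepF (i : Int) (vl : Int × Int) (t : Int) : Int × Int :=
  let level := vl.2 * 2
  (if pyBit i t = 1 then level + 1 - vl.1 else vl.1, level)

def descL (n : Nat) : List Int := (List.range n).map (fun (t : Nat) => ((n : Int) - 1) - (t : Int))

def pairAt (k : Nat) (i : Int) : Int × Int :=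
  (descL (k - 1)).foldl (stepF i) (1 + pyBit i ((k : Int) - 1), 2)

lemma length_stepD (b : List Int) : (stepD b).length = 2 * b.length := by
  induction b with
  | nil => rfl
  | cons x xs ih =>
    simp [stepD, List.length_flatMap] at *
    omega

lemma length_iterD (j : Nat) : (iterD j).length = 2 ^ (j + 1) := by
  induction j with
  | zero => rfl
  | succ j ih =>
    show (stepD (iterD j)).length = _
    rw [length_stepD, ih]
    ring

lemma pyBit_cons (i t b : Int) (hi : 0 ≤ i) (ht : 0 ≤ t) (hb : b = 0 ∨ b = 1) :
    pyBit (2 * i + b) (t + 1) = pyBit i t := by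
  unfold pyBit
  have h1 : (2 * i + b).toNat = 2 * i.toNat + b.toNat := by omega
  have h2 : (t + 1).toNat = t.toNat + 1 := by omega
  rw [h1, h2]
  congr 1
  have key : (2 * i.toNat + b.toNat) / 2 ^ (t.toNat + 1) = i.toNat / 2 ^ t.toNat := by
    rw [pow_succ', ← Nat.div_div_eq_div_mul]
    congr 1
    omega
  rw [Nat.shiftRight_eq_div_pow, Nat.shiftRight_eq_div_pow, key]

lemma pyBit_zero (i b : Int) (hi : 0 ≤ i) (hb : b = 0 ∨ b = 1) :
    pyBit (2 * i + b) 0 = b := by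
  unfold pyBit
  have h1 : (2 * i + b).toNat = 2 * i.toNat + b.toNat := by omega
  simp only [Int.toNat_zero, Nat.shiftRight_zero, h1]
  omega

lemma descL_succ (n : Nat) : descL (n + 1) = (descL n).map (· + 1) ++ [0] := by
  unfold descL
  rw [List.range_succ, List.map_append, List.map_map]
  congr 1
  · apply List.map_congr_left
    intro t _
    simp only [Function.comp]
    push_cast
    ring
  · simp only [List.map_cons, List.map_nil]
    congr 1
    push_cast
    ring

lemma mem_descL_nonneg (n : Nat) : ∀ t ∈ descL n, 0 ≤ t := by
  intro t ht
  simp only [descL, List.mem_map, List.mem_range] at ht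
  obtain ⟨j, hj, rfl⟩ := ht
  omega

lemma foldl_snd (i : Int) (l : List Int) (a : Int × Int) :
    (l.foldl (stepF i) a).2 = a.2 * 2 ^ l.length := by
  induction l generalizing a with
  | nil => simp
  | cons x xs ih =>
    simp only [List.foldl_cons, List.length_cons, ih, stepF]
    ring

lemma foldl_shift (i b : Int) (hi : 0 ≤ i) (hb : b = 0 ∨ b = 1) (l : List Int)
    (hl : ∀ t ∈ l, 0 ≤ t) (a : Int × Int) :
    l.foldl (fun x y => stepF (2 * i + b) x (y + 1)) a = l.foldl (stepF i) a := by
  induction l generalizing a with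
  | nil => rfl
  | cons x xs ih =>
    simp only [List.foldl_cons]
    rw [show stepF (2 * i + b) a (x + 1) = stepF i a x from by
      simp [stepF, pyBit_cons i x b hi (hl x (by simp)) hb]]
    exact ih (fun t ht => hl t (by simp [ht])) _

lemma pairAt_split (k : Nat) (hk : 1 ≤ k) (i b : Int) (hi : 0 ≤ i) (hb : b = 0 ∨ b = 1) :
    pairAt (k + 1) (2 * i + b) = stepF (2 * i + b) (pairAt k i) 0 := by
  unfold pairAt
  have hk1 : k + 1 - 1 = (k - 1) + 1 := by omega
  rw [hk1, descL_succ, List.foldl_append, List.foldl_map,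
    foldl_shift i b hi hb _ (mem_descL_nonneg _)]
  have hinit : (1 + pyBit (2 * i + b) (((k + 1 : Nat) : Int) - 1), (2 : Int)) =
      (1 + pyBit i ((k : Int) - 1), 2) := by
    have e : ((k + 1 : Nat) : Int) - 1 = ((k : Int) - 1) + 1 := by push_cast; ring
    rw [e, pyBit_cons i ((k : Int) - 1) b hi (by omega) hb]
  rw [hinit]
  rfl

lemma pairAt_level (k : Nat) (hk : 1 ≤ k) (i : Int) : (pairAt k i).2 = 2 ^ k := by
  unfold pairAt
  rw [foldl_snd]
  simp only [descL, List.length_map, List.length_range]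
  rw [← pow_succ']
  congr 1
  omega

lemma seed_split (k : Nat) (hk : 1 ≤ k) (i b : Int) (hi : 0 ≤ i) (hb : b = 0 ∨ b = 1) :
    (pairAt (k + 1) (2 * i + b)).1 =
      if b = 1 then 2 ^ (k + 1) + 1 - (pairAt k i).1 else (pairAt k i).1 := by
  rw [pairAt_split k hk i b hi hb]
  simp only [stepF]
  rw [pyBit_zero i b hi hb, pairAt_level k hk i]
  split_ifs <;> ring

lemma range_double (m : Nat) :
    List.range (2 * m) = (List.range m).flatMap (fun i => [2 * i, 2 * i + 1]) := by
  induction m with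
  | zero => rfl
  | succ m ih =>
    have h : 2 * (m + 1) = (2 * m + 1) + 1 := by ring
    rw [h, List.range_succ, List.range_succ, List.range_succ, ih]
    simp

lemma mainN (j : Nat) :
    iterD j = (List.range (2 ^ (j + 1))).map (fun (i : Nat) => (pairAt (j + 1) ((i : Nat) : Int)).1) := by
  induction j with
  | zero => decide
  | succ j ih =>
    have hlen : ((iterD j).length : Int) = 2 ^ (j + 1) := by
      rw [length_iterD]; push_cast; ring
    show stepD (iterD j) = _
    rw [stepD, hlen, ih, List.flatMap_map]
    have h2 : (2 : Nat) ^ (j + 1 + 1) = 2 * 2 ^ (j + 1) := by ring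
    rw [h2, range_double, List.map_flatMap]
    apply List.flatMap_congr
    intro i _
    have hi : (0 : Int) ≤ (i : Int) := by exact_mod_cast Nat.zero_le i
    have e0 : ((2 * i : Nat) : Int) = 2 * (i : Int) + 0 := by push_cast; ring
    have e1 : ((2 * i + 1 : Nat) : Int) = 2 * (i : Int) + 1 := by push_cast; ring
    simp only [List.map_cons, List.map_nil, e0, e1]
    rw [seed_split (j + 1) (by omega) (i : Int) 0 hi (Or.inl rfl),
      seed_split (j + 1) (by omega) (i : Int) 1 hi (Or.inr rfl)]
    norm_num [pow_succ]

lemma seedAt_eq_pairAt (k : Nat) (hk : 1 ≤ k) (i : Int) :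
    seedAt (k : Int) i = (pairAt k i).1 := by
  unfold seedAt pairAt
  congr 2
  rw [PySem.List.pyRange_neg_one]
  have hn : ((k : Int) - 2 - (-1)).toNat = k - 1 := by omega
  rw [hn]
  unfold descL
  apply List.map_congr_left
  intro t _
  have e : ((k - 1 : Nat) : Int) = (k : Int) - 1 := by omega
  rw [e]
  ring

lemma pointwise_py (j : Nat) :
    (PySem.List.pyRange 0 ((2 : Int) ^ (j + 1)) 1).map (fun i => seedAt ((j : Int) + 1) i) = iterD j := by
  rw [mainN j]
  have h2 : ((2 : Int) ^ (j + 1)) = ((2 ^ (j + 1) : Nat) : Int) := by push_cast; ring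
  rw [h2, PySem.List.pyRange_one]
  have hn : (((2 ^ (j + 1) : Nat) : Int) - 0).toNat = 2 ^ (j + 1) := by
    have := Int.toNat_natCast (2 ^ (j + 1) : Nat)
    omega
  rw [hn, List.map_map]
  apply List.map_congr_left
  intro t _
  simp only [Function.comp]
  have hk : ((j : Int) + 1) = ((j + 1 : Nat) : Int) := by push_cast; ring
  rw [hk]
  have := seedAt_eq_pairAt (j + 1) (by omega) ((0 : Int) + (t : Int))
  simpa using this

lemma loops_agree (fuel : Nat) (n : Int) (j : Nat) :
    growA fuel n (iterD j) =
      (let p := altSize fuel n ((2 : Int) ^ (j + 1)) ((j : Int) + 1)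
       (PySem.List.pyRange 0 p.1 1).map (fun i => seedAt p.2 i)) := by
  induction fuel generalizing j with
  | zero =>
    simp only [growA, altSize]
    exact (pointwise_py j).symm
  | succ fuel ih =>
    have hlen : ((iterD j).length : Int) = 2 ^ (j + 1) := by
      rw [length_iterD]; push_cast; ring
    simp only [growA, altSize, hlen]
    by_cases h : (2 : Int) ^ (j + 1) < n
    · rw [if_pos h, if_pos h]
      have hfold : (iterD j).foldl
          (fun new_bracket seed => new_bracket ++ [seed, ((2 : Int) ^ (j + 1) * 2 + 1) - seed]) [] =
          iterD (j + 1) := by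
        rw [PySem.List.foldl_append_eq_flatMap]
        simp [iterD, stepD, hlen]
      rw [hfold]
      have e1 : (2 : Int) ^ (j + 1) * 2 = 2 ^ (j + 1 + 1) := by ring
      have e2 : (j : Int) + 1 + 1 = ((j + 1 : Nat) : Int) + 1 := by push_cast; ring
      rw [e1, e2]
      exact ih (j + 1)
    · rw [if_neg h, if_neg h]
      exact (pointwise_py j).symm

-- ===== VERDICT (by name: the statement is the Claim_ definition above) =====
theorem generate_seeded_bracket_spec : Claim_equal_generate_seeded_bracket := by
  intro n _
  show generate_seeded_bracket n = generate_seeded_bracket_alt n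
  unfold generate_seeded_bracket generate_seeded_bracket_alt
  by_cases h : n = 1
  · simp [h]
  · simp only [if_neg h]
    have := loops_agree 64 n 0
    simpa using this
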